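-- pv_equiv track=rewrite | github.com/Asardinha-app/2025-optimizers-web-interface | MLB_Optimizer/utils/helpers.py | identify_stacks_simple
-- ===== SOURCE A (Python) =====
-- from typing import List, Dict, Optional, Tuple
--
-- def identify_stacks_simple(lineup_players: List[Dict]) -> Tuple[str, str]:
--     """
--     Simple stack identification
--
--     Args:
--         lineup_players: List of player dictionaries
--
--     Returns:
--         Tuple of (primary_stack, secondary_stack)
--     """
--     # Count players by team (excluding pitcher)
--     team_counts = {}
--     for player in lineup_players:
--         if player["Slot"] != "P":  # Exclude pitcher
--             team = player["Team"]
--             team_counts[team] = team_counts.get(team, 0) + 1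
--
--     # Find teams with most players
--     sorted_teams = sorted(team_counts.items(), key=lambda x: x[1], reverse=True)
--
--     primary_stack = sorted_teams[0][0] if sorted_teams else ""
--     secondary_stack = sorted_teams[1][0] if len(sorted_teams) > 1 else ""
--
--     return primary_stack, secondary_stack
-- ===== SOURCE B (Python) =====
-- from typing import List, Dict, Tuple
--
-- def identify_stacks_simple(lineup_players: List[Dict]) -> Tuple[str, str]:
--     # Count players by team (excluding pitcher)
--     team_counts = {}
--     for player in lineup_players:
--         if player["Slot"] != "P":
--             team = player["Team"]
--             team_counts[team] = team_counts.get(team, 0) + 1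
--     # Single linear pass keeping the two best (team, count) slots; strict '>'
--     # keeps the first-inserted team on ties, like the stable sort.
--     primary = secondary = None
--     for team, count in team_counts.items():
--         if primary is None or count > primary[1]:
--             primary, secondary = (team, count), primary
--         elif secondary is None or count > secondary[1]:
--             secondary = (team, count)
--     return (primary[0] if primary else "", secondary[0] if secondary else "")
-- ===== Notes on version B (the rewrite author's own statement) =====
-- stated objective: alternative
-- what changed: B keeps the per-team counting loop but replaces sorted(team_counts.items(), reverse=True) plus indexing by a single linear pass that maintains the two best (team,count) slots with strict '>' comparisons, reproducing the stable sort's tie-breaking.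
import Mathlib
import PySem

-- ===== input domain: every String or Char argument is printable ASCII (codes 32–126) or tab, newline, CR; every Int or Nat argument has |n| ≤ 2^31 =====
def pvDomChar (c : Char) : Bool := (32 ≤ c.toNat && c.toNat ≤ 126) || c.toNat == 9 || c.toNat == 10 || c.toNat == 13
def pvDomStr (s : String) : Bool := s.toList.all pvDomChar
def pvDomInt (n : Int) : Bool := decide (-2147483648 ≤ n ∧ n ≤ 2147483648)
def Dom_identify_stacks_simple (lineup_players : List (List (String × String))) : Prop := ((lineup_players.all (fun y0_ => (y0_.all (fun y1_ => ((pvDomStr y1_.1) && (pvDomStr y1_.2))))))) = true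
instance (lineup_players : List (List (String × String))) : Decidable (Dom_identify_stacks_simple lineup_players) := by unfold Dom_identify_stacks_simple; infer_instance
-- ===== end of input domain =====

-- B replaces A's sorted()+indexing by one linear pass keeping the two best (team,count) slots (alternative, not measured faster).

-- ===== PORT A =====
-- player["Slot"] / player["Team"]: Python raises KeyError when the key is missing; Pre_ guarantees
-- both lookups succeed, so the "" default of getD is never taken on admitted inputs.
def identify_stacks_simple (lineup_players : List (List (String × String))) : String × String :=
  let team_counts : PySem.Dict String Int :=
    lineup_players.foldl (fun tc player =>
      if ((PySem.Dict.mk player).getD "Slot" "") ≠ "P" then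
        let team := (PySem.Dict.mk player).getD "Team" ""
        tc.insert team (tc.getD team 0 + 1)
      else tc) PySem.Dict.empty
  let sorted_teams := PySem.List.sorted team_counts.items (fun x => x.2) true
  let primary_stack := match sorted_teams with | [] => "" | t :: _ => t.1
  let secondary_stack := match sorted_teams with | _ :: s :: _ => s.1 | _ => ""
  (primary_stack, secondary_stack)

-- ===== PORT B =====
-- one step of B's linear two-slot scan (the body of B's second loop)
def pvStep (st : Option (String × Int) × Option (String × Int)) (tc : String × Int) :
    Option (String × Int) × Option (String × Int) :=
  if (match st.1 with | none => true | some p => decide (tc.2 > p.2)) then (some tc, st.1)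
  else if (match st.2 with | none => true | some s => decide (tc.2 > s.2)) then (st.1, some tc)
  else st

def identify_stacks_simple_alt (lineup_players : List (List (String × String))) : String × String :=
  let team_counts : PySem.Dict String Int :=
    lineup_players.foldl (fun tc player =>
      if ((PySem.Dict.mk player).getD "Slot" "") ≠ "P" then
        let team := (PySem.Dict.mk player).getD "Team" ""
        tc.insert team (tc.getD team 0 + 1)
      else tc) PySem.Dict.empty
  let best := team_counts.items.foldl pvStep (none, none)
  ((best.1.map Prod.fst).getD "", (best.2.map Prod.fst).getD "")

-- ===== PRECONDITION & SPEC =====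
-- Pre_ excludes exactly the inputs where Python A raises KeyError: a player dict with no "Slot"
-- key, or a non-pitcher player dict with no "Team" key.
def Pre_identify_stacks_simple (lineup_players : List (List (String × String))) : Prop :=
  ∀ player ∈ lineup_players,
    ((PySem.Dict.mk player).get? "Slot").isSome = true ∧
    (((PySem.Dict.mk player).getD "Slot" "") ≠ "P" → ((PySem.Dict.mk player).get? "Team").isSome = true)
instance (lineup_players : List (List (String × String))) : Decidable (Pre_identify_stacks_simple lineup_players) := by unfold Pre_identify_stacks_simple; infer_instance

def pvWitness_identify_stacks_simple : (List (List (String × String))) :=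
  [[("Slot", "P"), ("Team", "NYY")], [("Slot", "1B"), ("Team", "NYY")], [("Slot", "2B"), ("Team", "BOS")]]

def Spec_identify_stacks_simple (lineup_players : List (List (String × String))) (out : String × String) : Prop := out = identify_stacks_simple_alt lineup_players
instance (lineup_players : List (List (String × String))) (out : String × String) : Decidable (Spec_identify_stacks_simple lineup_players out) := by unfold Spec_identify_stacks_simple; infer_instance

-- ===== CLAIM (what is proved, stated in full; the proofs are below) =====
def Claim_equal_identify_stacks_simple : Prop := ∀ (lineup_players : List (List (String × String))), Dom_identify_stacks_simple lineup_players → Pre_identify_stacks_simple lineup_players → Spec_identify_stacks_simple lineup_players (identify_stacks_simple lineup_players)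

-- ===== LEMMAS AND PROOFS =====

-- one insertion into the reverse-stable-sorted accumulator changes its first two
-- elements exactly as one step of B's two-slot scan
lemma pvStep_insertBy (x : String × Int) (acc : List (String × Int)) :
    ((PySem.List.insertBy (fun a b => decide (b.2 < a.2)) x acc)[0]?,
     (PySem.List.insertBy (fun a b => decide (b.2 < a.2)) x acc)[1]?) =
    pvStep (acc[0]?, acc[1]?) x := by
  match acc with
  | [] => simp [PySem.List.insertBy, pvStep]
  | a0 :: rest =>
    by_cases h0 : a0.2 < x.2
    · simp [PySem.List.insertBy, pvStep, h0]
    · match rest with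
      | [] => simp [PySem.List.insertBy, pvStep, h0]
      | a1 :: rest' =>
        by_cases h1 : a1.2 < x.2
        · simp [PySem.List.insertBy, pvStep, h0, h1]
        · simp [PySem.List.insertBy, pvStep, h0, h1]

-- B's scan over l computes the first two elements of the insertion-sort fold over l
lemma pvScan_foldl (l acc : List (String × Int)) :
    l.foldl pvStep (acc[0]?, acc[1]?) =
    ((l.foldl (fun acc x => PySem.List.insertBy (fun a b => decide (b.2 < a.2)) x acc) acc)[0]?,
     (l.foldl (fun acc x => PySem.List.insertBy (fun a b => decide (b.2 < a.2)) x acc) acc)[1]?) := by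
  induction l generalizing acc with
  | nil => rfl
  | cons x t ih =>
    simp only [List.foldl_cons]
    rw [← pvStep_insertBy x acc, ih]

-- the two selections agree on any items list
lemma pvSelect_eq (l : List (String × Int)) :
    ((match PySem.List.sorted l (fun x => x.2) true with | [] => "" | t :: _ => t.1),
     (match PySem.List.sorted l (fun x => x.2) true with | _ :: s :: _ => s.1 | _ => "")) =
    (((l.foldl pvStep (none, none)).1.map Prod.fst).getD "",
     ((l.foldl pvStep (none, none)).2.map Prod.fst).getD "") := by
  have h : l.foldl pvStep (none, none) =
      ((PySem.List.sorted l (fun x => x.2) true)[0]?, (PySem.List.sorted l (fun x => x.2) true)[1]?) := by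
    rw [PySem.List.sorted_rev_eq_foldl_insertBy]
    exact pvScan_foldl l []
  rw [h]
  match PySem.List.sorted l (fun x => x.2) true with
  | [] => rfl
  | [t] => rfl
  | t :: s :: _ => rfl

-- ===== VERDICT (by name: the statement is the Claim_ definition above) =====
theorem identify_stacks_simple_spec : Claim_equal_identify_stacks_simple := by
  intro lineup_players _ _
  unfold Spec_identify_stacks_simple identify_stacks_simple identify_stacks_simple_alt
  exact pvSelect_eq _
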